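-- pv_equiv track=rewrite | github.com/jbylund/arcane_tutor | api/parsing/tests/test_balance_query.py | balance_query
-- ===== SOURCE A (Python) =====
-- def balance_query(query):
--     """Balance quotes and parentheses for typeahead searches."""
--     balanced = query
--
--     # Count unmatched quotes (both single and double)
--     double_quote_count = 0
--     single_quote_count = 0
--     paren_count = 0
--
--     for char in balanced:
--         if char == '"':
--             double_quote_count += 1
--         elif char == "'":
--             single_quote_count += 1
--         elif char == '(':
--             paren_count += 1
--         elif char == ')':
--             paren_count -= 1
--
--     # Close unmatched double quotes
--     if double_quote_count % 2 == 1: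
--         balanced += '"'
--
--     # Close unmatched single quotes
--     if single_quote_count % 2 == 1:
--         balanced += "'"
--
--     # Close unmatched parentheses
--     while paren_count > 0:
--         balanced += ')'
--         paren_count -= 1
--
--     return balanced
-- ===== SOURCE B (Python) =====
-- def balance_query(query):
--     """Balance quotes and parentheses for typeahead searches."""
--
--     def scan(s):
--         # divide-and-conquer: (double-quote parity, single-quote parity, paren net)
--         # parities combine with xor, the paren net is additive
--         if len(s) <= 1:
--             return (s == '"', s == "'", (s == '(') - (s == ')'))
--         mid = len(s) // 2
--         d1, q1, p1 = scan(s[:mid])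
--         d2, q2, p2 = scan(s[mid:])
--         return (d1 ^ d2, q1 ^ q2, p1 + p2)
--
--     odd_double, odd_single, open_parens = scan(query)
--     out = query
--     if odd_double:
--         out += '"'
--     if odd_single:
--         out += "'"
--     return out + ')' * open_parens
-- ===== Notes on version B (the rewrite author's own statement) =====
-- stated objective: alternative
-- what changed: Replaces A's single left-to-right loop with manual integer counters by a divide-and-conquer scan: the string is split in halves recursively, each half yields a (double-quote parity, single-quote parity, paren net) summary combined with xor/addition, and the closers are appended from the combined summary.
import Mathlib
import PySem

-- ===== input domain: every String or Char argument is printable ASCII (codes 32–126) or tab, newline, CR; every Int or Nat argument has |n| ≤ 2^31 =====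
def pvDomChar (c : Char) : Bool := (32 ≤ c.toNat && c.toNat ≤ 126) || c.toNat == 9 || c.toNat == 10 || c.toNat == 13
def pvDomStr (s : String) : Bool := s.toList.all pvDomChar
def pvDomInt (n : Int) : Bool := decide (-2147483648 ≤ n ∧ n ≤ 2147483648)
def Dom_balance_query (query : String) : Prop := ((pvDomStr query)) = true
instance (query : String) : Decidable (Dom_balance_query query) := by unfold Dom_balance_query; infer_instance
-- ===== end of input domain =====

-- B replaces A's fused counting loop with a divide-and-conquer scan combining
-- (parity, parity, net) summaries of the two halves; return values proved equal.

-- ===== PORT A =====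
-- 'while paren_count > 0: balanced += ")"; paren_count -= 1'
def closeParens (balanced : String) (paren : Int) : String :=
  if paren > 0 then closeParens (balanced ++ ")") (paren - 1) else balanced
termination_by paren.toNat
decreasing_by omega

def balance_query (query : String) : String :=
  let balanced := query
  let counts := balanced.toList.foldl
    (fun (s : Int × Int × Int) char =>
      if char == '"' then (s.1 + 1, s.2.1, s.2.2)
      else if char == '\'' then (s.1, s.2.1 + 1, s.2.2)
      else if char == '(' then (s.1, s.2.1, s.2.2 + 1)
      else if char == ')' then (s.1, s.2.1, s.2.2 - 1)
      else s) (0, 0, 0)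
  let balanced := if counts.1 % 2 == 1 then balanced ++ "\"" else balanced
  let balanced := if counts.2.1 % 2 == 1 then balanced ++ "'" else balanced
  closeParens balanced counts.2.2

-- ===== PORT B =====
-- Source B's recursive scan: a 1-char Python string compares equal to '"' iff the char does,
-- and s[:mid]/s[mid:] with 0 ≤ mid ≤ len are List.take/List.drop
def scanBQ (l : List Char) : Bool × Bool × Int :=
  if l.length ≤ 1 then
    match l with
    | [] => (false, false, 0)
    | c :: _ => (c == '"', c == '\'',
        (if c == '(' then (1 : Int) else 0) - (if c == ')' then (1 : Int) else 0))
  else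
    let mid := l.length / 2
    let s1 := scanBQ (l.take mid)
    let s2 := scanBQ (l.drop mid)
    (xor s1.1 s2.1, xor s1.2.1 s2.2.1, s1.2.2 + s2.2.2)
termination_by l.length
decreasing_by
  · simp only [List.length_take]; omega
  · simp only [List.length_drop]; omega

-- ')' * n is ported as PySem.List.pyRepeat (exact: empty for n ≤ 0)
def balance_query_alt (query : String) : String :=
  let s := scanBQ query.toList
  let out := query
  let out := if s.1 then out ++ "\"" else out
  let out := if s.2.1 then out ++ "'" else out
  out ++ String.ofList (PySem.List.pyRepeat [')'] s.2.2)

-- ===== PRECONDITION & SPEC =====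
def Spec_balance_query (query : String) (out : String) : Prop := out = balance_query_alt query
instance (query : String) (out : String) : Decidable (Spec_balance_query query out) := by unfold Spec_balance_query; infer_instance

-- ===== CLAIM (what is proved, stated in full; the proofs are below) =====
def Claim_equal_balance_query : Prop := ∀ (query : String), Dom_balance_query query → Spec_balance_query query (balance_query query)

-- ===== LEMMAS AND PROOFS =====

-- A's fused loop computes the three character counts
lemma count_loop_eq (l : List Char) (a b c : Int) :
    l.foldl (fun (s : Int × Int × Int) char =>
      if char == '"' then (s.1 + 1, s.2.1, s.2.2)
      else if char == '\'' then (s.1, s.2.1 + 1, s.2.2)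
      else if char == '(' then (s.1, s.2.1, s.2.2 + 1)
      else if char == ')' then (s.1, s.2.1, s.2.2 - 1)
      else s) (a, b, c)
    = (a + l.count '"', b + l.count '\'', c + (l.count '(' : Int) - (l.count ')' : Int)) := by
  induction l generalizing a b c with
  | nil => simp
  | cons h t ih =>
      simp only [List.foldl_cons, List.count_cons]
      by_cases h1 : (h == '"') = true
      · rw [if_pos h1, ih]
        simp only [beq_iff_eq] at h1
        simp [h1]
        try omega
      · rw [if_neg h1]
        by_cases h2 : (h == '\'') = true
        · rw [if_pos h2, ih]
          simp only [beq_iff_eq] at h2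
          simp [h2]
          try omega
        · rw [if_neg h2]
          by_cases h3 : (h == '(') = true
          · rw [if_pos h3, ih]
            simp only [beq_iff_eq] at h3
            simp [h3]
            try omega
          · rw [if_neg h3]
            by_cases h4 : (h == ')') = true
            · rw [if_pos h4, ih]
              simp only [beq_iff_eq] at h4
              simp [h4]
              try omega
            · rw [if_neg h4, ih]
              simp only [beq_iff_eq] at h1 h2 h3 h4
              simp [h1, h2, h3, h4]

-- the while loop appends n closing parens
lemma closeParens_eq (s : String) (n : Int) :
    closeParens s n = s ++ String.ofList (List.replicate n.toNat ')') := by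
  generalize hk : n.toNat = k
  induction k generalizing s n with
  | zero =>
      rw [closeParens]
      have : ¬ n > 0 := by omega
      rw [if_neg this]
      apply String.ext
      simp
  | succ k ih =>
      rw [closeParens]
      have hpos : n > 0 := by omega
      have : (n - 1).toNat = k := by omega
      simp only [hpos, if_pos, ih _ _ this, List.replicate_succ]
      apply String.ext
      simp

-- xor of parities is the parity of the sum
lemma xor_parity (x y : Nat) :
    xor (decide (x % 2 = 1)) (decide (y % 2 = 1)) = decide ((x + y) % 2 = 1) := by
  rcases Nat.mod_two_eq_zero_or_one x with h | h <;>
    rcases Nat.mod_two_eq_zero_or_one y with h' | h' <;>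
    simp [h, h', Nat.add_mod]

-- counts split at any cut point
lemma count_take_drop (l : List Char) (m : Nat) (c : Char) :
    l.count c = (l.take m).count c + (l.drop m).count c := by
  rw [← List.count_append, List.take_append_drop]

-- the divide-and-conquer scan computes (count parity, count parity, count net)
lemma scanBQ_eq (l : List Char) :
    scanBQ l = (decide (l.count '"' % 2 = 1), decide (l.count '\'' % 2 = 1),
      (l.count '(' : Int) - (l.count ')' : Int)) := by
  induction l using scanBQ.induct with
  | case1 _ =>
      simp [scanBQ]
  | case2 c t hle =>
      have ht : t = [] := by simpa using hle
      subst ht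
      rw [scanBQ, if_pos hle]
      by_cases h1 : c = '"' <;> by_cases h2 : c = '\'' <;> by_cases h3 : c = '(' <;>
        by_cases h4 : c = ')' <;> simp_all
  | case3 l hle mid ih1 ih2 =>
      rw [scanBQ.eq_def, if_neg hle]
      simp only []
      rw [show l.length / 2 = mid from rfl, ih1, ih2]
      rw [xor_parity, xor_parity, ← count_take_drop, ← count_take_drop]
      have hp : ((l.take mid).count '(' : Int) - (l.take mid).count ')'
          + (((l.drop mid).count '(' : Int) - (l.drop mid).count ')')
          = (l.count '(' : Int) - l.count ')' := by
        rw [count_take_drop l mid '(', count_take_drop l mid ')']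
        push_cast
        ring
      rw [hp]

-- ===== VERDICT (by name: the statement is the Claim_ definition above) =====
theorem balance_query_spec : Claim_equal_balance_query := by
  intro query _
  unfold Spec_balance_query balance_query balance_query_alt
  simp only [count_loop_eq, closeParens_eq, scanBQ_eq, zero_add,
    PySem.List.pyRepeat_singleton]
  have e1 : (((query.toList.count '"' : Int)) % 2 == 1) =
      decide (query.toList.count '"' % 2 = 1) := by
    rcases Nat.mod_two_eq_zero_or_one (query.toList.count '"') with h | h <;>
      simp [h] <;> omega
  have e2 : (((query.toList.count '\'' : Int)) % 2 == 1) =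
      decide (query.toList.count '\'' % 2 = 1) := by
    rcases Nat.mod_two_eq_zero_or_one (query.toList.count '\'') with h | h <;>
      simp [h] <;> omega
  rw [e1, e2]
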